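-- pv_equiv track=rewrite | github.com/Gedeon-Pil/StudyFlow | server.py | cleanUpResponse
-- ===== SOURCE A (Python) =====
-- def cleanUpResponse(text, maxSentences=5, minSentenceLength=30):
--     punctuationMarks = {".", "?", "!"}
--     newText = ""
--     for char in text:
--         newText += char
--         if char in punctuationMarks:
--             newText += " "
--     text = " ".join(newText.split())
--
--     sentenceCount = 0
--     index = 0
--     prevIndex = 0
--     textLength = len(text)
--     textResult = ""
--     while index < textLength:
--         if text[index] in punctuationMarks:
--             if index - prevIndex >= minSentenceLength:
--                 sentenceCount += 1
--                 textResult += text[prevIndex:index + 1]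
--                 if (sentenceCount == 5):
--                     break
--             prevIndex = index + 1
--         index += 1
--     index -= 1
--     if sentenceCount < 5:
--         textResult += text[prevIndex:]
--     return textResult
-- ===== SOURCE B (Python) =====
-- def cleanUpResponse(text, maxSentences=5, minSentenceLength=30):
--     marks = ".?!"
--     # normalize: a space after every terminal mark, then collapse all whitespace
--     spaced = "".join(c + " " if c in marks else c for c in text)
--     text = " ".join(spaced.split())
--     # one pass with a running segment buffer instead of index/prevIndex slicing
--     res = ""
--     buf = ""
--     count = 0
--     for c in text:
--         buf += c
--         if c in marks:
--             if len(buf) - 1 >= minSentenceLength: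
--                 res += buf
--                 count += 1
--                 if count == 5:
--                     return res
--             buf = ""
--     return res + buf
-- ===== Notes on version B (the rewrite author's own statement) =====
-- stated objective: simpler
-- what changed: Replaces A's index/prevIndex while-loop with slicing and a post-loop tail append by a single forward pass that accumulates the current segment in a buffer, appends it when it ends in a mark and is long enough, and early-returns at the 5th kept segment; the normalization is a join over a generator instead of character-by-character string concatenation.
import Mathlib
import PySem

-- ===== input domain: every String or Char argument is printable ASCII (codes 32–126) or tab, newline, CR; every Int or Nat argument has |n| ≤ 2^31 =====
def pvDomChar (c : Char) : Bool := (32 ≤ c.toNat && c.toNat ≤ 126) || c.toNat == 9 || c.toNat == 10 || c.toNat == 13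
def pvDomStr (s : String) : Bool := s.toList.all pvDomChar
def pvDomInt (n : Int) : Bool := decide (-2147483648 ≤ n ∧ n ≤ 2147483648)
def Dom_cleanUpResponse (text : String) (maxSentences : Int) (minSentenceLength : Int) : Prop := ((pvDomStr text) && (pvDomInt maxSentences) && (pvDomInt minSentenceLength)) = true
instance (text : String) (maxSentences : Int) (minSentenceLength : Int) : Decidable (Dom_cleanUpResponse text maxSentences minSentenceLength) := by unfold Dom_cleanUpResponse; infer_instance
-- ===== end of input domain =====

-- B replaces A's index/prevIndex while-loop with slicing by a single pass keeping a running
-- segment buffer (objective: simpler; same behaviour, including A's hard-coded limit of 5).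

-- ===== PORT A =====
def pvMark (c : Char) : Bool := c == '.' || c == '?' || c == '!'

-- A's while loop: index scan with prevIndex and slices; break at sentenceCount == 5,
-- tail text[prevIndex:] appended after the loop when sentenceCount < 5.
def pvALoop (t : List Char) (minLen : Int) (index prevIndex : Nat) (count : Int)
    (res : List Char) : List Char :=
  if _h : index < t.length then
    if pvMark (t.getD index ' ') then
      if (index : Int) - (prevIndex : Int) ≥ minLen then
        let res' := res ++ PySem.List.slice t (some (prevIndex : Int)) (some ((index : Int) + 1))
        if count + 1 = 5 then res'
        else pvALoop t minLen (index + 1) (index + 1) (count + 1) res'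
      else pvALoop t minLen (index + 1) (index + 1) count res
    else pvALoop t minLen (index + 1) prevIndex count res
  else
    if count < 5 then res ++ PySem.List.slice t (some (prevIndex : Int)) none else res
termination_by t.length - index

def cleanUpResponse (text : String) (maxSentences : Int) (minSentenceLength : Int) : String :=
  let newText := text.toList.foldl
    (fun acc c => if pvMark c then (acc ++ [c]) ++ [' '] else acc ++ [c]) []
  let t := PySem.Chars.join [' '] (PySem.Chars.split₀ newText)
  String.ofList (pvALoop t minSentenceLength 0 0 0 [])

-- ===== PORT B =====
-- B's single pass: accumulate the current segment in buf; on a mark, keep it iff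
-- len(buf) - 1 >= minSentenceLength, early-return at the 5th kept segment.
def pvBLoop (minLen : Int) (res buf : List Char) (count : Int) : List Char → List Char
  | [] => res ++ buf
  | c :: rest =>
    let buf' := buf ++ [c]
    if pvMark c then
      if (buf'.length : Int) - 1 ≥ minLen then
        let res' := res ++ buf'
        if count + 1 = 5 then res'
        else pvBLoop minLen res' [] (count + 1) rest
      else pvBLoop minLen res [] count rest
    else pvBLoop minLen res buf' count rest

def cleanUpResponse_alt (text : String) (maxSentences : Int) (minSentenceLength : Int) : String :=
  let spaced := text.toList.flatMap (fun c => if pvMark c then [c, ' '] else [c])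
  let t := PySem.Chars.join [' '] (PySem.Chars.split₀ spaced)
  String.ofList (pvBLoop minSentenceLength [] [] 0 t)

-- ===== PRECONDITION & SPEC =====
def Spec_cleanUpResponse (text : String) (maxSentences : Int) (minSentenceLength : Int) (out : String) : Prop := out = cleanUpResponse_alt text maxSentences minSentenceLength
instance (text : String) (maxSentences : Int) (minSentenceLength : Int) (out : String) : Decidable (Spec_cleanUpResponse text maxSentences minSentenceLength out) := by unfold Spec_cleanUpResponse; infer_instance

-- ===== CLAIM (what is proved, stated in full; the proofs are below) =====
def Claim_equal_cleanUpResponse : Prop := ∀ (text : String) (maxSentences : Int) (minSentenceLength : Int), Dom_cleanUpResponse text maxSentences minSentenceLength → Spec_cleanUpResponse text maxSentences minSentenceLength (cleanUpResponse text maxSentences minSentenceLength)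

-- ===== LEMMAS AND PROOFS =====

-- the two normalizations build the same spaced character list
theorem pvNorm_eq (l : List Char) :
    l.foldl (fun acc c => if pvMark c then (acc ++ [c]) ++ [' '] else acc ++ [c]) [] =
    l.flatMap (fun c => if pvMark c then [c, ' '] else [c]) := by
  have : ∀ acc : List Char,
      l.foldl (fun acc c => if pvMark c then (acc ++ [c]) ++ [' '] else acc ++ [c]) acc =
      acc ++ l.flatMap (fun c => if pvMark c then [c, ' '] else [c]) := by
    induction l with
    | nil => simp
    | cons c rest ih =>
      intro acc
      simp only [List.foldl_cons, List.flatMap_cons, ih]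
      by_cases h : pvMark c = true <;> simp [h]
  simpa using this []

-- A's state (index, prevIndex, count, res) corresponds to B's state
-- (res, buf = t[prevIndex:index], count) on the remaining input t.drop index
theorem pvLoop_eq (t : List Char) (minLen : Int) :
    ∀ (index prevIndex : Nat) (count : Int) (res : List Char),
      prevIndex ≤ index → index ≤ t.length → count < 5 →
      pvALoop t minLen index prevIndex count res =
        pvBLoop minLen res ((t.drop prevIndex).take (index - prevIndex)) count (t.drop index) := by
  intro index
  induction hn : t.length - index using Nat.strong_induction_on generalizing index with
  | _ n ih =>
  intro prevIndex count res hpi hil hc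
  by_cases h : index < t.length
  · -- one character c = t[index] is consumed on both sides
    have hget : t.drop index = t[index] :: t.drop (index + 1) := by
      rw [List.drop_eq_getElem_cons h]
    have hbuf : (t.drop prevIndex).take (index - prevIndex) ++ [t[index]] =
        (t.drop prevIndex).take (index + 1 - prevIndex) := by
      have h1 : index + 1 - prevIndex = (index - prevIndex) + 1 := by omega
      rw [h1, List.take_succ]
      have h2 : (t.drop prevIndex)[index - prevIndex]? = some t[index] := by
        rw [List.getElem?_drop]
        have : prevIndex + (index - prevIndex) = index := by omega
        rw [this, List.getElem?_eq_getElem h]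
      simp [h2]
    have hlenbuf : ((t.drop prevIndex).take (index + 1 - prevIndex)).length
        = index + 1 - prevIndex := by
      rw [List.length_take, List.length_drop]; omega
    rw [pvALoop, dif_pos h, hget]
    simp only [pvBLoop]
    rw [List.getD_eq_getElem t ' ' h]
    by_cases hm : pvMark t[index] = true
    · rw [if_pos hm, if_pos hm, hbuf, hlenbuf]
      have hcond : ((index : Int) - (prevIndex : Int) ≥ minLen) ↔
          (((index + 1 - prevIndex : Nat) : Int) - 1 ≥ minLen) := by
        constructor <;> intro hh <;> [skip; skip] <;> omega
      by_cases hlen : (index : Int) - (prevIndex : Int) ≥ minLen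
      · rw [if_pos hlen, if_pos (hcond.mp hlen)]
        have hslice : PySem.List.slice t (some (prevIndex : Int)) (some ((index : Int) + 1)) =
            (t.drop prevIndex).take (index + 1 - prevIndex) := by
          have : ((index : Int) + 1) = ((index + 1 : Nat) : Int) := by push_cast; ring
          rw [this, PySem.List.slice_natCast]
        rw [hslice]
        by_cases h5 : count + 1 = 5
        · rw [if_pos h5, if_pos h5]
        · rw [if_neg h5, if_neg h5]
          rw [ih (t.length - (index + 1)) (by omega) (index + 1) rfl (index + 1)
              (count + 1) _ (le_refl _) (by omega) (by omega)]
          simp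
      · rw [if_neg hlen, if_neg (fun hh => hlen (hcond.mpr hh))]
        rw [ih (t.length - (index + 1)) (by omega) (index + 1) rfl (index + 1)
            count res (le_refl _) (by omega) hc]
        simp
    · rw [if_neg hm, if_neg hm, hbuf]
      exact ih (t.length - (index + 1)) (by omega) (index + 1) rfl prevIndex count res
        (by omega) (by omega) hc
  · -- loop exhausted: A appends text[prevIndex:], B returns res ++ buf
    have hix : index = t.length := by omega
    rw [pvALoop, dif_neg h, if_pos hc]
    have hd : t.drop index = [] := by rw [List.drop_eq_nil_iff]; omega
    rw [hd]
    simp only [pvBLoop]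
    rw [PySem.List.slice_from_natCast]
    congr 1
    rw [List.take_of_length_le]
    rw [List.length_drop]; omega

-- ===== VERDICT (by name: the statement is the Claim_ definition above) =====
theorem cleanUpResponse_spec : Claim_equal_cleanUpResponse := by
  intro text maxSentences minSentenceLength _
  unfold Spec_cleanUpResponse
  simp only [cleanUpResponse, cleanUpResponse_alt, pvNorm_eq]
  rw [pvLoop_eq _ _ 0 0 0 [] (le_refl _) (Nat.zero_le _) (by omega)]
  simp
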